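-- pv_equiv track=rewrite | github.com/azzahraamonra-etu/kattis | src/lvable.py | lvable
-- ===== SOURCE A (Python) =====
-- def lvable(n: int, s: str) -> int:
--     """
--     Solves the Lvable problem from Kattis.
--     URL: https://open.kattis.com/problems/lvable
--
--     Args:
--     n (int): Length of the string s.
--     s (str): The input string.
--
--     Returns:
--     int: The minimum number of operations to make the string contain "lv".
--     """
--     # Case 1: Already contains "lv"
--     if "lv" in s:
--         return 0
--
--     min_ops = float('inf')
--
--     # Case 2: Can we replace one character to make "lv"?
--     for i in range(n - 1):
--         a, b = s[i], s[i+1]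
--         cost = 0
--         if a != 'l':
--             cost += 1
--         if b != 'v':
--             cost += 1
--         min_ops = min(min_ops, cost)
--
--     # Case 3: Can we reverse "vl" to make "lv"?
--     if "vl" in s:
--         min_ops = min(min_ops, 1)
--
--     # Case 4: Insert "lv" (always takes 2 operations)
--     min_ops = min(min_ops, 2)
--
--     return min_ops
-- ===== SOURCE B (Python) =====
-- def lvable(n: int, s: str) -> int:
--     if "lv" in s:
--         return 0
--     if "vl" in s or (n >= 2 and ('l' in s[:n-1] or 'v' in s[1:n])):
--         return 1
--     return 2
-- ===== Notes on version B (the rewrite author's own statement) =====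
-- stated objective: faster
-- what changed: Replaced the per-index min-accumulating loop by a direct case analysis: the answer is 1 iff "vl" occurs or (n>=2 and 'l' occurs in s[:n-1] or 'v' occurs in s[1:n]), else 2.
import Mathlib
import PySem

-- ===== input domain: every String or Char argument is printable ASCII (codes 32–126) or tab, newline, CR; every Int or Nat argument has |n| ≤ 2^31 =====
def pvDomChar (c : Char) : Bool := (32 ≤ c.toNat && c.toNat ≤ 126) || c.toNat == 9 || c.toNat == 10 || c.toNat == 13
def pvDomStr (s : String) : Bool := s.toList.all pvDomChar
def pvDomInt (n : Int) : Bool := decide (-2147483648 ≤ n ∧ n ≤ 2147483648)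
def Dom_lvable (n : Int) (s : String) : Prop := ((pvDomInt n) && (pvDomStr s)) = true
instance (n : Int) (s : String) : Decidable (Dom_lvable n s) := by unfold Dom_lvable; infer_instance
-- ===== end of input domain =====

-- B replaces A's per-index min-accumulating loop by a direct case analysis on substring/slice tests (measured faster in a timing run).

-- ===== PORT A =====
-- min_ops starts at float('inf'); modelled as `none` (exact: inf is only ever an identity for min here,
-- every other compared value is an int, and the final min with 2 guarantees an int result).
def lvOptMin (m : Option Int) (c : Int) : Option Int :=
  some (match m with | none => c | some v => min v c)

def lvable (n : Int) (s : String) : Int :=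
  if PySem.Str.isIn "lv" s then 0
  else
    let minOps : Option Int := (PySem.List.pyRange 0 (n - 1) 1).foldl
      (fun m i =>
        let a := PySem.List.pyGetD s.toList i ' '        -- s[i]   (in range under Pre_)
        let b := PySem.List.pyGetD s.toList (i + 1) ' '  -- s[i+1] (in range under Pre_)
        let cost : Int := (if a ≠ 'l' then 1 else 0) + (if b ≠ 'v' then 1 else 0)
        lvOptMin m cost) none
    let minOps := if PySem.Str.isIn "vl" s then lvOptMin minOps 1 else minOps
    match lvOptMin minOps 2 with
    | some v => v
    | none => 2   -- unreachable: lvOptMin always returns some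

-- ===== PORT B =====
def lvable_alt (n : Int) (s : String) : Int :=
  if PySem.Str.isIn "lv" s then 0
  else if PySem.Str.isIn "vl" s
       || (decide (2 ≤ n)
           && (PySem.Str.isIn "l" (PySem.Str.slice s none (some (n - 1)))
               || PySem.Str.isIn "v" (PySem.Str.slice s (some 1) (some n)))) then 1
  else 2

-- ===== PRECONDITION & SPEC =====
-- A raises IndexError when "lv" is absent and n exceeds len(s) (the loop reads s[i+1] past the end);
-- exactly those inputs are excluded.
def Pre_lvable (n : Int) (s : String) : Prop :=
  PySem.Str.isIn "lv" s = true ∨ n ≤ (s.toList.length : Int)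
instance (n : Int) (s : String) : Decidable (Pre_lvable n s) := by unfold Pre_lvable; infer_instance
def pvWitness_lvable : Int × String := (3, "alp")

def Spec_lvable (n : Int) (s : String) (out : Int) : Prop := out = lvable_alt n s
instance (n : Int) (s : String) (out : Int) : Decidable (Spec_lvable n s out) := by unfold Spec_lvable; infer_instance

-- ===== CLAIM (what is proved, stated in full; the proofs are below) =====
def Claim_equal_lvable : Prop := ∀ (n : Int) (s : String), Dom_lvable n s → Pre_lvable n s → Spec_lvable n s (lvable n s)

-- ===== LEMMAS AND PROOFS =====

-- a singleton substring test is membership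
lemma singleton_isIn_iff (c : Char) (xs : List Char) :
    PySem.Chars.isIn [c] xs = true ↔ c ∈ xs := by
  rw [PySem.Chars.isIn_iff_infix]
  constructor
  · intro h; exact h.sublist.subset (by simp)
  · intro h
    obtain ⟨l₁, l₂, rfl⟩ := List.append_of_mem h
    exact ⟨l₁, l₂, by simp⟩

-- no "lv" at any position
lemma not_pair_of_no_lv (cs : List Char) (hno : ¬ (['l','v'] <:+: cs))
    (i : Nat) (h : i + 1 < cs.length) :
    ¬ (cs[i]'(by omega) = 'l' ∧ cs[i+1]'h = 'v') := by
  rintro ⟨h1, h2⟩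
  apply hno
  refine ⟨cs.take i, cs.drop (i+2), ?_⟩
  have hd : cs.drop i = cs[i]'(by omega) :: cs[i+1]'h :: cs.drop (i+2) := by
    rw [List.drop_eq_getElem_cons (by omega), List.drop_eq_getElem_cons h]
  conv_rhs => rw [← List.take_append_drop i cs, hd, h1, h2]
  simp

-- the loop's value for k ≥ 1 steps
lemma fold_min_eq (cs : List Char) (hno : ¬ (['l','v'] <:+: cs)) :
    ∀ (k : Nat), 0 < k → k < cs.length →
    (PySem.List.pyRange 0 (k : Int) 1).foldl
      (fun m i =>
        let a := PySem.List.pyGetD cs i ' '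
        let b := PySem.List.pyGetD cs (i + 1) ' '
        let cost : Int := (if a ≠ 'l' then 1 else 0) + (if b ≠ 'v' then 1 else 0)
        lvOptMin m cost) none
    = some (if ('l' ∈ cs.take k ∨ 'v' ∈ (cs.drop 1).take k) then 1 else 2) := by
  intro k
  induction k with
  | zero => intro h; omega
  | succ k ih =>
    intro _ hlen
    by_cases hk0 : k = 0
    · subst hk0
      rw [show ((0 + 1 : Nat) : Int) = 0 + 1 by norm_num]
      rw [PySem.List.pyRange_one_singleton]
      have h0 : 0 < cs.length := by omega
      have h1 : 1 < cs.length := by omega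
      simp only [List.foldl_cons, List.foldl_nil]
      rw [show (PySem.List.pyGetD cs 0 ' ') = cs[0] from by
            rw [PySem.List.pyGetD_eq_getElem cs ' ' (by omega) (by exact_mod_cast h0)]; simp]
      rw [show (PySem.List.pyGetD cs (0 + 1) ' ') = cs[1] from by
            rw [PySem.List.pyGetD_eq_getElem cs ' ' (by omega) (by exact_mod_cast h1)]; simp]
      have htk : cs.take 1 = [cs[0]] := by
        rw [List.take_add_one]; simp [List.getElem?_eq_getElem h0]
      have hdk : (cs.drop 1).take 1 = [cs[1]] := by
        have hl : 0 < (cs.drop 1).length := by simp; omega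
        rw [List.take_add_one]; simp
      rw [htk, hdk]
      have hnp := not_pair_of_no_lv cs hno 0 h1
      simp only [lvOptMin, List.mem_singleton]
      by_cases hA : cs[0] = 'l' <;> by_cases hB : cs[1] = 'v' <;>
        simp [hA, hB] at hnp ⊢ <;> tauto
    · have hkpos : 0 < k := Nat.pos_of_ne_zero hk0
      rw [show ((k + 1 : Nat) : Int) = (k : Int) + 1 by push_cast; ring]
      rw [PySem.List.pyRange_one_succ_right (by positivity)]
      rw [List.foldl_append]
      rw [ih hkpos (by omega)]
      simp only [List.foldl_cons, List.foldl_nil]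
      have hk1 : k + 1 < cs.length := hlen
      rw [show (PySem.List.pyGetD cs (k : Int) ' ') = cs[k]'(by omega) from by
            rw [PySem.List.pyGetD_eq_getElem cs ' ' (by positivity) (by exact_mod_cast (by omega : k < cs.length))]
            simp]
      rw [show (PySem.List.pyGetD cs ((k : Int) + 1) ' ') = cs[k+1]'hk1 from by
            rw [show ((k : Int) + 1) = ((k + 1 : Nat) : Int) by push_cast; ring]
            rw [PySem.List.pyGetD_eq_getElem cs ' ' (by positivity) (by exact_mod_cast hk1)]
            simp]
      have htk : cs.take (k + 1) = cs.take k ++ [cs[k]] := by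
        rw [List.take_add_one]; simp [List.getElem?_eq_getElem (by omega : k < cs.length)]
      have hdl : k < (cs.drop 1).length := by simp; omega
      have hdk : (cs.drop 1).take (k + 1) = (cs.drop 1).take k ++ [cs[k+1]] := by
        rw [List.take_add_one]; simp
      rw [htk, hdk]
      have hnp := not_pair_of_no_lv cs hno k hk1
      simp only [lvOptMin, List.mem_append, List.mem_singleton]
      by_cases hP : ('l' ∈ cs.take k ∨ 'v' ∈ (cs.drop 1).take k) <;>
        by_cases hA : cs[k] = 'l' <;> by_cases hB : cs[k+1] = 'v' <;>
        (try simp [hA, hB] at hnp) <;> (try simp only [List.drop_one] at hP) <;>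
        simp [hA, hB, hP] <;> tauto

-- ===== VERDICT (by name: the statement is the Claim_ definition above) =====
theorem lvable_spec : Claim_equal_lvable := by
  intro n s _ hpre
  unfold Spec_lvable lvable lvable_alt
  by_cases hlv : PySem.Str.isIn "lv" s = true
  · simp only [hlv]; simp
  · have hlvf : PySem.Str.isIn "lv" s = false := by simpa using hlv
    have hno : ¬ (['l','v'] <:+: s.toList) := by
      intro h
      exact hlv ((PySem.Str.isIn_iff_infix "lv" s).mpr (by simpa using h))
    have hn : n ≤ (s.toList.length : Int) := by
      rcases hpre with h | h
      · rw [h] at hlvf; cases hlvf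
      · exact h
    simp only [hlvf, Bool.false_eq_true, if_false]
    by_cases hn1 : n ≤ 1
    · rw [PySem.List.pyRange_one_eq_nil (by omega)]
      have hnot2 : ¬ ((2:Int) ≤ n) := by omega
      cases hvlb : PySem.Str.isIn "vl" s <;> simp [hvlb, hnot2, lvOptMin]
    · obtain ⟨k, hkeq, hkpos, hklen⟩ :
          ∃ k : Nat, n - 1 = (k : Int) ∧ 0 < k ∧ k < s.toList.length := by
        refine ⟨(n - 1).toNat, by omega, by omega, by omega⟩
      rw [hkeq, fold_min_eq s.toList hno k hkpos hklen]
      have e1 : PySem.List.slice s.toList none (some (n - 1)) = s.toList.take k := by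
        rw [hkeq, PySem.List.slice_to _ (by positivity)]
        simp
      have e2 : PySem.List.slice s.toList (some 1) (some n) = (s.toList.drop 1).take k := by
        rw [PySem.List.slice_toNat _ (by omega) (by omega)]
        have h1 : (1 : Int).toNat = 1 := rfl
        have h2 : n.toNat - 1 = k := by omega
        rw [h1, h2]
      have h2n : (2:Int) ≤ n := by omega
      by_cases hL : 'l' ∈ s.toList.take k <;>
        by_cases hV : 'v' ∈ (s.toList.drop 1).take k <;>
        cases hvlb : PySem.Str.isIn "vl" s <;>
        simp [hvlb, lvOptMin, e1, e2, singleton_isIn_iff, hL, hV, h2n] <;>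
        omega
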